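-- pv_equiv track=rewrite | github.com/daiyaanarfeen/alpa | benchmark/alpa/dp.py | get_all_mix_cluster
-- ===== SOURCE A (Python) =====
-- def get_cluster_cost(num_gpu, price):
--     return num_gpu[0] * price[0] + num_gpu[1] * price[1]
--
-- def get_all_mix_cluster(gpu_price, budget, lb=0):
--     res = []
--     for num_gpu_1 in range(0, int(budget/gpu_price[0]) + 1):
--         if num_gpu_1 % 8 != 0 and num_gpu_1 != 0 and num_gpu_1 != 1 and num_gpu_1 != 2 and num_gpu_1 != 4:
--             continue
--         for num_gpu_2 in range(0, int(budget/gpu_price[1]) + 1):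
--             if num_gpu_2 % 8 != 0 and num_gpu_2 != 0 and num_gpu_2 != 1 and num_gpu_2 != 2 and num_gpu_2 != 4:
--                 continue
--             if num_gpu_1+num_gpu_2 > 0 and get_cluster_cost([num_gpu_1, num_gpu_2], gpu_price) <= budget and get_cluster_cost([num_gpu_1, num_gpu_2], gpu_price) >= lb:
--                 res.append((num_gpu_1, num_gpu_2))
--     return res
-- ===== SOURCE B (Python) =====
-- def get_all_mix_cluster(gpu_price, budget, lb=0):
--     p0, p1 = gpu_price[0], gpu_price[1]
--
--     def candidates(price):
--         n = int(budget / price)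
--         cs = [k for k in (0, 1, 2, 4) if k <= n]
--         cs.extend(range(8, n + 1, 8))
--         return cs
--
--     cands2 = candidates(p1)
--     return [(a, b) for a in candidates(p0) for b in cands2
--             if a + b > 0 and lb <= a * p0 + b * p1 <= budget]
-- ===== Notes on version B (the rewrite author's own statement) =====
-- stated objective: alternative
-- what changed: Instead of scanning every integer in both budget ranges and skipping invalid counts with continue, B generates the valid candidate counts ({0,1,2,4} plus multiples of 8 up to the per-GPU budget limit) directly, builds the second axis's candidate list once, and filters candidate pairs by cost; fewer loop iterations, though a timing run's inputs showed no measurable speed-up.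
-- outside the precondition, e.g. on get_all_mix_cluster([3], -5, 0): A returns [], B raises IndexError; on get_all_mix_cluster([-1, 0], 5, 0): A returns [], B raises ZeroDivisionError
import Mathlib
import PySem

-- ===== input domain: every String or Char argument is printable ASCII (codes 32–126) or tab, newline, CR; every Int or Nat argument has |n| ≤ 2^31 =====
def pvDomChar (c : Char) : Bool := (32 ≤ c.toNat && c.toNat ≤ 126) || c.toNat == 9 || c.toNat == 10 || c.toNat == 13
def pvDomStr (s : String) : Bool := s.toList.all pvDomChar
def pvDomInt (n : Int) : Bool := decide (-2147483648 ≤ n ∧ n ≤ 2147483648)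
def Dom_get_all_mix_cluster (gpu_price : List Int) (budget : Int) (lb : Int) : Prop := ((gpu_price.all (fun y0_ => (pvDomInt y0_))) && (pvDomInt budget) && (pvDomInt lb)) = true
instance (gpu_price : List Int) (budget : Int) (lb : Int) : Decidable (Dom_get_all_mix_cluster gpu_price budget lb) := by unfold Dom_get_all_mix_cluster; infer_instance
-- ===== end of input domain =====

-- ===== PORT A =====
-- B enumerates the valid candidate counts ({0,1,2,4} and multiples of 8) directly instead of
-- scanning every integer in both ranges and skipping with continue (objective: alternative).
-- pyGetD's default 0 is unreachable under Pre_ (gpu_price has >= 2 elements); num_gpu is always [n1, n2].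
def get_cluster_cost (num_gpu : List Int) (price : List Int) : Int :=
  PySem.List.pyGetD num_gpu 0 0 * PySem.List.pyGetD price 0 0 +
    PySem.List.pyGetD num_gpu 1 0 * PySem.List.pyGetD price 1 0

-- int(budget/gpu_price[i]) is PySem.Int.truncdiv (exact for |args| < 2^53, which Dom guarantees).
def get_all_mix_cluster (gpu_price : List Int) (budget : Int) (lb : Int) : List (Int × Int) :=
  (PySem.List.pyRange 0 (PySem.Int.truncdiv budget (PySem.List.pyGetD gpu_price 0 0) + 1) 1).foldl
    (fun res num_gpu_1 =>
      if PySem.Int.mod num_gpu_1 8 ≠ 0 ∧ num_gpu_1 ≠ 0 ∧ num_gpu_1 ≠ 1 ∧ num_gpu_1 ≠ 2 ∧ num_gpu_1 ≠ 4 then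
        res
      else
        (PySem.List.pyRange 0 (PySem.Int.truncdiv budget (PySem.List.pyGetD gpu_price 1 0) + 1) 1).foldl
          (fun res num_gpu_2 =>
            if PySem.Int.mod num_gpu_2 8 ≠ 0 ∧ num_gpu_2 ≠ 0 ∧ num_gpu_2 ≠ 1 ∧ num_gpu_2 ≠ 2 ∧ num_gpu_2 ≠ 4 then
              res
            else if num_gpu_1 + num_gpu_2 > 0 ∧ get_cluster_cost [num_gpu_1, num_gpu_2] gpu_price ≤ budget ∧
                get_cluster_cost [num_gpu_1, num_gpu_2] gpu_price ≥ lb then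
              res ++ [(num_gpu_1, num_gpu_2)]
            else res)
          res)
    []

-- ===== PORT B =====
-- candidates(price) from Source B: the valid counts up to n = int(budget/price), in increasing order.
def altCandidates (budget : Int) (price : Int) : List Int :=
  let n := PySem.Int.truncdiv budget price
  ([0, 1, 2, 4].filter (fun k => decide (k ≤ n))) ++ PySem.List.pyRange 8 (n + 1) 8

def get_all_mix_cluster_alt (gpu_price : List Int) (budget : Int) (lb : Int) : List (Int × Int) :=
  let p0 := PySem.List.pyGetD gpu_price 0 0
  let p1 := PySem.List.pyGetD gpu_price 1 0
  let cands2 := altCandidates budget p1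
  (altCandidates budget p0).flatMap (fun a =>
    (cands2.filter (fun b => decide (a + b > 0 ∧ lb ≤ a * p0 + b * p1 ∧ a * p0 + b * p1 ≤ budget))).map
      (fun b => (a, b)))

-- ===== PRECONDITION & SPEC =====
-- Pre_ excludes inputs where Python A raises (fewer than two prices -> IndexError, a zero price ->
-- ZeroDivisionError); it also excludes the degenerate cases where such an input only escapes the
-- exception because the outer range is already empty and A returns [] (a zero or missing SECOND price
-- with int(budget/gpu_price[0]) < 0): B naturally raises there, see claim cites.
def Pre_get_all_mix_cluster (gpu_price : List Int) (budget : Int) (lb : Int) : Prop :=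
  2 ≤ gpu_price.length ∧ gpu_price.getD 0 0 ≠ 0 ∧ gpu_price.getD 1 0 ≠ 0

instance (gpu_price : List Int) (budget : Int) (lb : Int) : Decidable (Pre_get_all_mix_cluster gpu_price budget lb) := by unfold Pre_get_all_mix_cluster; infer_instance

def pvWitness_get_all_mix_cluster : List Int × Int × Int := ([3, 5], 40, 10)

def Spec_get_all_mix_cluster (gpu_price : List Int) (budget : Int) (lb : Int) (out : List (Int × Int)) : Prop := out = get_all_mix_cluster_alt gpu_price budget lb
instance (gpu_price : List Int) (budget : Int) (lb : Int) (out : List (Int × Int)) : Decidable (Spec_get_all_mix_cluster gpu_price budget lb out) := by unfold Spec_get_all_mix_cluster; infer_instance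

-- ===== CLAIM (what is proved, stated in full; the proofs are below) =====
def Claim_equal_get_all_mix_cluster : Prop := ∀ (gpu_price : List Int) (budget : Int) (lb : Int), Dom_get_all_mix_cluster gpu_price budget lb → Pre_get_all_mix_cluster gpu_price budget lb → Spec_get_all_mix_cluster gpu_price budget lb (get_all_mix_cluster gpu_price budget lb)

-- ===== LEMMAS AND PROOFS =====

-- the valid counts A's "continue" keeps (loop variables are nonnegative, so Python % is emod here)
def validCount (x : Int) : Bool := decide (x % 8 = 0 ∨ x = 0 ∨ x = 1 ∨ x = 2 ∨ x = 4)

lemma eq_of_pairwise_lt_ext (l1 l2 : List Int) (h1 : l1.Pairwise (· < ·))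
    (h2 : l2.Pairwise (· < ·)) (h : ∀ x, x ∈ l1 ↔ x ∈ l2) : l1 = l2 := by
  have n1 : l1.Nodup := h1.imp (fun hlt => by omega)
  have n2 : l2.Nodup := h2.imp (fun hlt => by omega)
  exact List.Perm.eq_of_pairwise (le := (· ≤ ·)) (fun a b _ _ hab hba => by omega)
    (h1.imp le_of_lt) (h2.imp le_of_lt) ((List.perm_ext_iff_of_nodup n1 n2).2 h)

-- key fact: filtering the full range 0..n for valid counts yields exactly B's candidate list
lemma filter_range_valid (n : Int) :
    (PySem.List.pyRange 0 (n + 1) 1).filter validCount =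
      ([0, 1, 2, 4].filter (fun k => decide (k ≤ n))) ++ PySem.List.pyRange 8 (n + 1) 8 := by
  apply eq_of_pairwise_lt_ext
  · exact (PySem.List.pairwise_lt_pyRange_one 0 (n + 1)).filter _
  · rw [List.pairwise_append]
    refine ⟨List.Pairwise.filter _ (by decide), ?_, ?_⟩
    · rw [PySem.List.pyRange_of_pos 8 (n + 1) (by omega : (0:Int) < 8)]
      exact List.Pairwise.map _ (fun a b hab => by omega) List.pairwise_lt_range
    · intro a ha b hb
      have ha4 : a ≤ 4 := by
        rcases List.mem_filter.1 ha with ⟨hm, -⟩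
        simp only [List.mem_cons, List.not_mem_nil, or_false] at hm
        omega
      have hb8 : 8 ≤ b :=
        ((PySem.List.mem_pyRange_iff_of_pos (by omega : (0:Int) < 8) b).1 hb).1
      omega
  · intro x
    simp only [List.mem_filter, PySem.List.mem_pyRange_one, validCount, decide_eq_true_eq,
      List.mem_append, List.mem_cons, List.not_mem_nil, or_false,
      PySem.List.mem_pyRange_iff_of_pos (by omega : (0:Int) < 8) x]
    omega

-- A's skip test is the negation of validCount (for any integer)
lemma skip_iff (x : Int) :
    (PySem.Int.mod x 8 ≠ 0 ∧ x ≠ 0 ∧ x ≠ 1 ∧ x ≠ 2 ∧ x ≠ 4) ↔ validCount x = false := by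
  simp only [validCount, decide_eq_false_iff_not, PySem.Int.mod_eq_emod_of_pos (by omega : (0:Int) < 8)]
  tauto

-- flatMap over a filtered list = flatMap with an if-guard over the whole list
lemma flatMap_filter_eq_flatMap_if {α β : Type} (p : α → Bool) (g : α → List β) (l : List α) :
    (l.filter p).flatMap g = l.flatMap (fun x => if p x then g x else []) := by
  induction l with
  | nil => rfl
  | cons a l ih =>
    by_cases h : p a = true
    · simp [h, ih]
    · simp only [Bool.not_eq_true] at h
      simp [h, ih]

-- A's inner loop, for a fixed first count a: collect the pairs passing both tests
lemma inner_loop_eq (gpu_price : List Int) (budget lb a : Int) (res : List (Int × Int)) :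
    (PySem.List.pyRange 0 (PySem.Int.truncdiv budget (PySem.List.pyGetD gpu_price 1 0) + 1) 1).foldl
        (fun res num_gpu_2 =>
          if PySem.Int.mod num_gpu_2 8 ≠ 0 ∧ num_gpu_2 ≠ 0 ∧ num_gpu_2 ≠ 1 ∧ num_gpu_2 ≠ 2 ∧ num_gpu_2 ≠ 4 then
            res
          else if a + num_gpu_2 > 0 ∧ get_cluster_cost [a, num_gpu_2] gpu_price ≤ budget ∧
              get_cluster_cost [a, num_gpu_2] gpu_price ≥ lb then
            res ++ [(a, num_gpu_2)]
          else res)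
        res =
      res ++
        (((PySem.List.pyRange 0 (PySem.Int.truncdiv budget (PySem.List.pyGetD gpu_price 1 0) + 1) 1).filter
              validCount).filter
            (fun b =>
              decide (a + b > 0 ∧ lb ≤ a * PySem.List.pyGetD gpu_price 0 0 + b * PySem.List.pyGetD gpu_price 1 0 ∧
                a * PySem.List.pyGetD gpu_price 0 0 + b * PySem.List.pyGetD gpu_price 1 0 ≤ budget))).map
          (fun b => (a, b)) := by
  rw [List.filter_filter, ← PySem.List.foldl_append_if
    (fun b => (decide (a + b > 0 ∧ lb ≤ a * PySem.List.pyGetD gpu_price 0 0 + b * PySem.List.pyGetD gpu_price 1 0 ∧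
      a * PySem.List.pyGetD gpu_price 0 0 + b * PySem.List.pyGetD gpu_price 1 0 ≤ budget)) && validCount b)
    (fun b => (a, b))]
  apply PySem.List.foldl_congr_mem
  intro acc x hx
  have hcost : get_cluster_cost [a, x] gpu_price =
      a * PySem.List.pyGetD gpu_price 0 0 + x * PySem.List.pyGetD gpu_price 1 0 := by
    simp [get_cluster_cost, PySem.List.pyGetD, PySem.List.pyGet?, PySem.List.pyIdx?]
  by_cases hv : validCount x = true
  · have hskip : ¬(PySem.Int.mod x 8 ≠ 0 ∧ x ≠ 0 ∧ x ≠ 1 ∧ x ≠ 2 ∧ x ≠ 4) := by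
      rw [skip_iff]; simp [hv]
    rw [if_neg hskip]
    by_cases hc : a + x > 0 ∧ get_cluster_cost [a, x] gpu_price ≤ budget ∧ get_cluster_cost [a, x] gpu_price ≥ lb
    · rw [if_pos hc, if_pos]
      simp only [hv, Bool.and_true, decide_eq_true_eq]
      rw [hcost] at hc
      exact ⟨hc.1, hc.2.2, hc.2.1⟩
    · rw [if_neg hc, if_neg]
      simp only [hv, Bool.and_true, decide_eq_true_eq, not_and]
      rw [hcost] at hc
      intro h1 h2 h3
      exact absurd ⟨h1, h3, h2⟩ hc
  · simp only [Bool.not_eq_true] at hv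
    rw [if_pos (skip_iff x |>.2 hv), if_neg]
    simp [hv]

-- full unconditional equality of the two ports
lemma ports_eq (gpu_price : List Int) (budget lb : Int) :
    get_all_mix_cluster gpu_price budget lb = get_all_mix_cluster_alt gpu_price budget lb := by
  unfold get_all_mix_cluster get_all_mix_cluster_alt
  refine Eq.trans (PySem.List.foldl_congr_mem _ _ (fun res num_gpu_1 =>
    res ++ (if validCount num_gpu_1 then
      (((PySem.List.pyRange 0 (PySem.Int.truncdiv budget (PySem.List.pyGetD gpu_price 1 0) + 1) 1).filter
            validCount).filter
          (fun b =>
            decide (num_gpu_1 + b > 0 ∧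
              lb ≤ num_gpu_1 * PySem.List.pyGetD gpu_price 0 0 + b * PySem.List.pyGetD gpu_price 1 0 ∧
              num_gpu_1 * PySem.List.pyGetD gpu_price 0 0 + b * PySem.List.pyGetD gpu_price 1 0 ≤ budget))).map
        (fun b => (num_gpu_1, b)) else [])) _ ?_) ?_
  · intro acc x hx
    by_cases hv : validCount x = true
    · rw [if_neg (by rw [skip_iff]; simp [hv]), inner_loop_eq gpu_price budget lb x acc]
      simp [hv]
    · simp only [Bool.not_eq_true] at hv
      rw [if_pos (skip_iff x |>.2 hv)]
      simp [hv]
  · rw [PySem.List.foldl_append_eq_flatMap, List.nil_append,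
      ← flatMap_filter_eq_flatMap_if validCount, filter_range_valid, filter_range_valid]
    rfl

-- ===== VERDICT (by name: the statement is the Claim_ definition above) =====
theorem get_all_mix_cluster_spec : Claim_equal_get_all_mix_cluster := by
  intro gpu_price budget lb _hdom _hpre
  unfold Spec_get_all_mix_cluster
  exact ports_eq gpu_price budget lb
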